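-- pv_equiv track=rewrite | github.com/Rahul2k5/cf_codes | div2_contest.py | pair_segments
-- ===== SOURCE A (Python) =====
-- def pair_segments(n,q,x,queries):
--     a = {}
--     for i in range(1, n + 1):
--         k_p = (i - 1) * (n - i + 1) + (n - i)
--         a[k_p] = a.get(k_p, 0) + 1
--         if i < n:
--             diff = x[i] - x[i - 1] - 1
--             if diff > 0:
--                 b = i * (n - i)
--                 a[b] = a.get(b, 0) + diff
--     ans = []
--     for i in queries:
--         ans.append(str(a.get(i, 0)))
--     return ' '.join(ans)
-- ===== SOURCE B (Python) =====
-- def pair_segments(n, q, x, queries):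
--     # Dict-free re-implementation: answer each query by a direct scan over i
--     # (return value only; same O(n*q) inputs, slower than A's single-pass index).
--     ans = []
--     for v in queries:
--         count = 0
--         for i in range(1, n + 1):
--             if (i - 1) * (n - i + 1) + (n - i) == v:
--                 count += 1
--             if i < n:
--                 diff = x[i] - x[i - 1] - 1
--                 if diff > 0 and i * (n - i) == v:
--                     count += diff
--         ans.append(str(count))
--     return ' '.join(ans)
-- ===== Notes on version B (the rewrite author's own statement) =====
-- stated objective: alternative
-- what changed: B drops A's counting dictionary entirely: each query is answered by a fresh arithmetic scan over i=1..n with a plain integer counter, instead of one pass that builds a hash index which is then looked up per query.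
import Mathlib
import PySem

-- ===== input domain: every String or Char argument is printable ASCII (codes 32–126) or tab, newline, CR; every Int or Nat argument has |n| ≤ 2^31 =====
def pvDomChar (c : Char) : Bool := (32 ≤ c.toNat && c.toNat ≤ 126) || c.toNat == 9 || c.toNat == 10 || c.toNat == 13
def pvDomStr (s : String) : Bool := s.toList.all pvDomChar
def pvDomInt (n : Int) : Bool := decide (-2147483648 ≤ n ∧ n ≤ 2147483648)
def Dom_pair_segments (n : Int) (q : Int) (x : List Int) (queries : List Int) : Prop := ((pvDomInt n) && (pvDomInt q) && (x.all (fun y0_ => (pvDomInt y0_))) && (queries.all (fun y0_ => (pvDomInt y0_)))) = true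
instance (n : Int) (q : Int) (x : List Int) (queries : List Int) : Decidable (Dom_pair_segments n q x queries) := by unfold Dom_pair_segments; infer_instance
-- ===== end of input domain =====

-- B answers each query by a direct arithmetic scan instead of A's precomputed counting dict (alternative decomposition, not faster).


-- ===== PORT A =====
-- one iteration of A's dict-building loop body (x[i]/x[i-1] as pyGetD; in range under Pre_)
def pvStepA (n : Int) (x : List Int) (a : PySem.Dict Int Int) (i : Int) : PySem.Dict Int Int :=
  let k_p := (i - 1) * (n - i + 1) + (n - i)
  let a := a.insert k_p (a.getD k_p 0 + 1)
  if i < n then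
    let diff := PySem.List.pyGetD x i 0 - PySem.List.pyGetD x (i - 1) 0 - 1
    if diff > 0 then
      let b := i * (n - i)
      a.insert b (a.getD b 0 + diff)
    else a
  else a

def pair_segments (n : Int) (q : Int) (x : List Int) (queries : List Int) : String :=
  let a := (PySem.List.pyRange 1 (n + 1) 1).foldl (pvStepA n x) PySem.Dict.empty
  let ans := queries.foldl (fun ans i => ans ++ [PySem.Int.toStr (a.getD i 0)]) ([] : List String)
  PySem.Str.join " " ans

-- ===== PORT B =====
-- one iteration of B's inner counting scan for a fixed query value v
def pvStepB (n : Int) (x : List Int) (v : Int) (count : Int) (i : Int) : Int :=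
  let count := if (i - 1) * (n - i + 1) + (n - i) = v then count + 1 else count
  if i < n then
    let diff := PySem.List.pyGetD x i 0 - PySem.List.pyGetD x (i - 1) 0 - 1
    if diff > 0 ∧ i * (n - i) = v then count + diff else count
  else count

def pvCountB (n : Int) (x : List Int) (v : Int) : Int :=
  (PySem.List.pyRange 1 (n + 1) 1).foldl (pvStepB n x v) 0

def pair_segments_alt (n : Int) (q : Int) (x : List Int) (queries : List Int) : String :=
  PySem.Str.join " "
    (queries.foldl (fun ans v => ans ++ [PySem.Int.toStr (pvCountB n x v)]) ([] : List String))

-- ===== PRECONDITION & SPEC =====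
-- Pre_ excludes exactly the inputs where Python A raises IndexError: for n ≥ 2 the loop reads x[1..n-1], so it needs n ≤ len(x).
def Pre_pair_segments (n : Int) (q : Int) (x : List Int) (queries : List Int) : Prop :=
  n ≤ 1 ∨ n ≤ (x.length : Int)
instance (n : Int) (q : Int) (x : List Int) (queries : List Int) : Decidable (Pre_pair_segments n q x queries) := by unfold Pre_pair_segments; infer_instance

def pvWitness_pair_segments : Int × Int × List Int × List Int := (4, 5, [1, 3, 4, 7], [3, 4, 2, 0, 5])

def Spec_pair_segments (n : Int) (q : Int) (x : List Int) (queries : List Int) (out : String) : Prop := out = pair_segments_alt n q x queries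
instance (n : Int) (q : Int) (x : List Int) (queries : List Int) (out : String) : Decidable (Spec_pair_segments n q x queries out) := by unfold Spec_pair_segments; infer_instance

-- ===== CLAIM (what is proved, stated in full; the proofs are below) =====
def Claim_equal_pair_segments : Prop := ∀ (n : Int) (q : Int) (x : List Int) (queries : List Int), Dom_pair_segments n q x queries → Pre_pair_segments n q x queries → Spec_pair_segments n q x queries (pair_segments n q x queries)

-- ===== LEMMAS AND PROOFS =====

-- one A-step seen through the dict lookup at v is exactly one B-step on the counter
lemma pv_step_comm (n : Int) (x : List Int) (d : PySem.Dict Int Int) (i v : Int) :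
    (pvStepA n x d i).getD v 0 = pvStepB n x v (d.getD v 0) i := by
  simp only [pvStepA, pvStepB]
  split_ifs <;> simp_all [PySem.Dict.getD_insert] <;> omega

lemma pv_fold_comm (n : Int) (x : List Int) (v : Int) :
    ∀ (l : List Int) (d : PySem.Dict Int Int),
      (l.foldl (pvStepA n x) d).getD v 0 = l.foldl (pvStepB n x v) (d.getD v 0) := by
  intro l
  induction l with
  | nil => intro d; rfl
  | cons i t ih => intro d; simp only [List.foldl_cons, ih, pv_step_comm]

lemma pv_getD_eq_count (n : Int) (x : List Int) (v : Int) :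
    ((PySem.List.pyRange 1 (n + 1) 1).foldl (pvStepA n x) PySem.Dict.empty).getD v 0
      = pvCountB n x v := by
  rw [pvCountB, pv_fold_comm]
  rfl

-- ===== VERDICT (by name: the statement is the Claim_ definition above) =====
theorem pair_segments_spec : Claim_equal_pair_segments := by
  intro n q x queries _ _
  show pair_segments n q x queries = pair_segments_alt n q x queries
  simp only [pair_segments, pair_segments_alt,
    PySem.List.foldl_append_singleton_eq_map, List.nil_append]
  congr 1
  exact List.map_congr_left (fun v _ => by rw [pv_getD_eq_count])
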